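-- pv_equiv track=rewrite | github.com/paulssonlab/paulssonlab | paulssonlab/src/paulssonlab/cloning/sequence.py | longest_contiguous_matching
-- ===== SOURCE A (Python) =====
-- def longest_contiguous_matching(a, b):
--     max_length = min(len(a), len(b))
--     max_score = 0
--     start = 0
--     score = 0
--     idxs = range(max_length)
--     for i in idxs:
--         if a[i] == b[i]:
--             score += 1
--         else:
--             if score > max_score:
--                 start = i - score
--                 max_score = score
--             score = 0
--     if score > max_score:
--         start = max_length - score
--         max_score = score
--     stop = start + max_score
--     return max_score, start, stop
-- ===== SOURCE B (Python) =====
-- def longest_contiguous_matching(a, b):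
--     n = min(len(a), len(b))
--     eqs = [a[i] == b[i] for i in range(n)]
--     # phase 1: run-length encode eqs into maximal (value, length) groups
--     runs = []
--     idx = 0
--     while idx < n:
--         k = eqs[idx]
--         j = idx + 1
--         while j < n and eqs[j] == k:
--             j += 1
--         runs.append((k, j - idx))
--         idx = j
--     # phase 2: pick the first longest True run
--     best_len = 0
--     best_start = 0
--     pos = 0
--     for k, length in runs:
--         if k and length > best_len:
--             best_len = length
--             best_start = pos
--         pos += length
--     return best_len, best_start, best_start + best_len
-- ===== Notes on version B (the rewrite author's own statement) =====
-- stated objective: alternative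
-- what changed: Replaces A's online single scan with running score/backdated start arithmetic by a two-phase run-length encoding: build the equality list, group it into maximal runs, then pick the first longest True run while accumulating positions.
import Mathlib
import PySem

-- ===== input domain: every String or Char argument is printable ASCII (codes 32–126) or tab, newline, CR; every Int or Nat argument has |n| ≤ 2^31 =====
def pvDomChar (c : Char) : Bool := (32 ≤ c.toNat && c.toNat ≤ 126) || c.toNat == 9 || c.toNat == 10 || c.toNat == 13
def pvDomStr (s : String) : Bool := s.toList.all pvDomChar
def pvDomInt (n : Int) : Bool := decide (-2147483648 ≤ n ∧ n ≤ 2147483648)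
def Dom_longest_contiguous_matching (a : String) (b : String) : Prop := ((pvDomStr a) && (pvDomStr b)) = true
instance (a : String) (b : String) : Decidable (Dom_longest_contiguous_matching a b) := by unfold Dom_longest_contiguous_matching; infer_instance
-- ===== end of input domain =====

-- B replaces A's online scan (running score with back-dated start arithmetic) by a two-phase
-- run-length-encode-then-pick decomposition; same O(n) cost, objective 'alternative'.

-- ===== PORT A =====
-- the loop body of A ('if a[i] == b[i]: … else: …') on state (max_score, start, score)
def pvStepA (a : String) (b : String) (s : Int × Int × Int) (i : Int) : Int × Int × Int :=
  if PySem.Str.pyGet? a i == PySem.Str.pyGet? b i then (s.1, s.2.1, s.2.2 + 1)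
  else if s.2.2 > s.1 then (s.2.2, i - s.2.2, 0) else (s.1, s.2.1, 0)

def longest_contiguous_matching (a : String) (b : String) : Int × Int × Int :=
  let maxLength : Int := min (PySem.Str.len a) (PySem.Str.len b)
  let r := (PySem.List.pyRange 0 maxLength 1).foldl (pvStepA a b) (0, 0, 0)
  let maxScore := if r.2.2 > r.1 then r.2.2 else r.1
  let start := if r.2.2 > r.1 then maxLength - r.2.2 else r.2.1
  (maxScore, start, start + maxScore)

-- ===== PORT B =====
-- Source B phase 1: run-length encode the equality list into maximal (value, length) groups
-- ('scan forward while equal, emit the group, continue on the rest' = takeWhile/dropWhile)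
def pvRuns : List Bool → List (Bool × Int)
  | [] => []
  | c :: rest =>
      (c, 1 + ((rest.takeWhile (· == c)).length : Int)) :: pvRuns (rest.dropWhile (· == c))
termination_by l => l.length
decreasing_by
  simpa using Nat.lt_succ_of_le (List.length_dropWhile_le (· == c) rest)

-- Source B phase 2: first longest True run, accumulating the position
def pvPick : List (Bool × Int) → Int → Int → Int → Int × Int
  | [], _, bestLen, bestStart => (bestLen, bestStart)
  | (k, len) :: t, pos, bestLen, bestStart =>
      if k = true ∧ len > bestLen then pvPick t (pos + len) len pos
      else pvPick t (pos + len) bestLen bestStart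

def longest_contiguous_matching_alt (a : String) (b : String) : Int × Int × Int :=
  let n : Int := min (PySem.Str.len a) (PySem.Str.len b)
  let eqs := (PySem.List.pyRange 0 n 1).map
    (fun i => PySem.Str.pyGet? a i == PySem.Str.pyGet? b i)
  let r := pvPick (pvRuns eqs) 0 0 0
  (r.1, r.2, r.2 + r.1)

-- ===== PRECONDITION & SPEC =====
def Spec_longest_contiguous_matching (a : String) (b : String) (out : Int × Int × Int) : Prop := out = longest_contiguous_matching_alt a b
instance (a : String) (b : String) (out : Int × Int × Int) : Decidable (Spec_longest_contiguous_matching a b out) := by unfold Spec_longest_contiguous_matching; infer_instance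

-- ===== CLAIM (what is proved, stated in full; the proofs are below) =====
def Claim_equal_longest_contiguous_matching : Prop := ∀ (a : String) (b : String), Dom_longest_contiguous_matching a b → Spec_longest_contiguous_matching a b (longest_contiguous_matching a b)

-- ===== LEMMAS AND PROOFS =====

-- A's loop re-stated structurally over the list of per-position equality booleans
def pvLoopA : List Bool → Int → Int × Int × Int → Int × Int × Int
  | [], _, s => s
  | e :: l, i, s =>
      pvLoopA l (i + 1)
        (if e then (s.1, s.2.1, s.2.2 + 1)
         else if s.2.2 > s.1 then (s.2.2, i - s.2.2, 0) else (s.1, s.2.1, 0))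

-- A's loop plus its final fix-up, returning (max_score, start)
def pvFinA (l : List Bool) (i : Int) (s : Int × Int × Int) : Int × Int :=
  let r := pvLoopA l i s
  if r.2.2 > r.1 then (r.2.2, (i + l.length) - r.2.2) else (r.1, r.2.1)

-- prepend a pending True run of length sc to a run list
def pvMerge (sc : Int) (rl : List (Bool × Int)) : List (Bool × Int) :=
  if sc = 0 then rl
  else match rl with
    | (true, len) :: t => (true, sc + len) :: t
    | _ => (true, sc) :: rl

theorem pvRuns_cons (c : Bool) (l : List Bool) :
    pvRuns (c :: l) = match pvRuns l with
      | (k, len) :: t => if k = c then (c, len + 1) :: t else (c, 1) :: (k, len) :: t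
      | [] => [(c, 1)] := by
  cases l with
  | nil => simp [pvRuns]
  | cons d t =>
      by_cases h : d = c
      · subst h
        rw [pvRuns, pvRuns]
        simp [List.takeWhile, List.dropWhile]
        ring
      · rw [pvRuns, pvRuns]
        have hdc : (d == c) = false := by simp [h]
        simp only [List.takeWhile, List.dropWhile, hdc, if_neg h]
        rw [pvRuns]
        norm_num

theorem pvPick_runs_false (l : List Bool) (pos bl bs : Int) :
    pvPick (pvRuns (false :: l)) pos bl bs = pvPick (pvRuns l) (pos + 1) bl bs := by
  rw [pvRuns_cons]
  cases hr : pvRuns l with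
  | nil => simp [pvPick]
  | cons p t =>
      obtain ⟨k, len⟩ := p
      cases k with
      | false =>
          simp only [pvPick]
          have : pos + (len + 1) = pos + 1 + len := by ring
          simp [this, pvPick]
      | true => simp [pvPick]

theorem pvMerge_runs_true (sc : Int) (hsc : 0 ≤ sc) (l : List Bool) :
    pvMerge sc (pvRuns (true :: l)) = pvMerge (sc + 1) (pvRuns l) := by
  have h1 : sc + 1 ≠ 0 := by omega
  rw [pvRuns_cons]
  cases hr : pvRuns l with
  | nil =>
      by_cases h : sc = 0 <;> simp [pvMerge, h, h1]
  | cons p t =>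
      obtain ⟨k, len⟩ := p
      cases k with
      | false => by_cases h : sc = 0 <;> simp [pvMerge, h, h1]
      | true => by_cases h : sc = 0 <;> simp [pvMerge, h, h1] <;> omega

theorem pvMain (l : List Bool) : ∀ (i ms st sc : Int), 0 ≤ ms → 0 ≤ sc →
    pvFinA l i (ms, st, sc) = pvPick (pvMerge sc (pvRuns l)) (i - sc) ms st := by
  induction l with
  | nil =>
      intro i ms st sc hms hsc
      by_cases h : sc = 0
      · subst h
        have hng : ¬ (0 : Int) > ms := by omega
        simp [pvFinA, pvLoopA, pvMerge, pvRuns, pvPick, hng]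
      · have : pvMerge sc (pvRuns []) = [(true, sc)] := by simp [pvMerge, pvRuns, h]
        rw [this]
        by_cases hgt : sc > ms
        · simp [pvFinA, pvLoopA, pvPick, hgt]
        · simp [pvFinA, pvLoopA, pvPick, hgt]
  | cons e l ih =>
      intro i ms st sc hms hsc
      have hfin : pvFinA (e :: l) i (ms, st, sc) =
          pvFinA l (i + 1)
            (if e then (ms, st, sc + 1)
             else if sc > ms then (sc, i - sc, 0) else (ms, st, 0)) := by
        simp only [pvFinA, pvLoopA, List.length_cons]
        have : i + ((l.length + 1 : Nat) : Int) = i + 1 + (l.length : Int) := by push_cast; ring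
        rw [this]
      cases e with
      | true =>
          rw [hfin, if_pos rfl]
          rw [ih (i + 1) ms st (sc + 1) hms (by omega)]
          rw [pvMerge_runs_true sc hsc l]
          congr 1
          omega
      | false =>
          rw [hfin, if_neg (by simp : ¬ false = true)]
          rw [show (if sc > ms then (sc, i - sc, 0) else (ms, st, 0))
                = ((if sc > ms then sc else ms), (if sc > ms then i - sc else st), (0 : Int))
              from by split <;> rfl]
          rw [ih (i + 1) (if sc > ms then sc else ms) (if sc > ms then i - sc else st) 0
              (by split <;> omega) le_rfl]
          rw [show pvMerge 0 (pvRuns l) = pvRuns l from by simp [pvMerge], sub_zero]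
          by_cases h : sc = 0
          · subst h
            have hng : ¬ (0 : Int) > ms := by omega
            simp only [if_neg hng]
            rw [show pvMerge 0 (pvRuns (false :: l)) = pvRuns (false :: l) from by simp [pvMerge],
              pvPick_runs_false, show i - 0 + 1 = i + 1 from by ring]
          · have hmerge : pvMerge sc (pvRuns (false :: l)) = (true, sc) :: pvRuns (false :: l) := by
              rw [pvRuns_cons]
              cases hr : pvRuns l with
              | nil => simp [pvMerge, h]
              | cons p t =>
                  obtain ⟨k, len⟩ := p
                  cases k <;> simp [pvMerge, h]
            rw [hmerge]
            by_cases hgt : sc > ms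
            · rw [show pvPick ((true, sc) :: pvRuns (false :: l)) (i - sc) ms st
                    = pvPick (pvRuns (false :: l)) (i - sc + sc) sc (i - sc) by
                  simp [pvPick, hgt]]
              rw [pvPick_runs_false, show i - sc + sc + 1 = i + 1 from by ring]
              simp [hgt]
            · rw [show pvPick ((true, sc) :: pvRuns (false :: l)) (i - sc) ms st
                    = pvPick (pvRuns (false :: l)) (i - sc + sc) ms st by
                  simp [pvPick, hgt]]
              rw [pvPick_runs_false, show i - sc + sc + 1 = i + 1 from by ring]
              simp [hgt]

theorem pvBridgeA (a b : String) : ∀ (l : List Bool) (i : Int) (s : Int × Int × Int),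
    (∀ (k : Nat), k < l.length →
      (PySem.Str.pyGet? a (i + k) == PySem.Str.pyGet? b (i + k)) = l[k]!) →
    (PySem.List.pyRange i (i + l.length) 1).foldl (pvStepA a b) s = pvLoopA l i s := by
  intro l
  induction l with
  | nil =>
      intro i s _
      simp [PySem.List.pyRange_one_eq_nil le_rfl, pvLoopA]
  | cons e l ih =>
      intro i s h
      have hlt : i < i + (↑l.length + 1) := by omega
      rw [List.length_cons, show ((l.length + 1 : Nat) : Int) = (l.length : Int) + 1 by push_cast; ring,
        PySem.List.pyRange_one_cons hlt]
      rw [List.foldl_cons]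
      have h0 := h 0 (by simp)
      simp only [Int.natCast_zero, add_zero] at h0
      have hstep : pvStepA a b s i =
          (if e then (s.1, s.2.1, s.2.2 + 1)
           else if s.2.2 > s.1 then (s.2.2, i - s.2.2, 0) else (s.1, s.2.1, 0)) := by
        rw [pvStepA, h0]
        simp
      have hrange : i + (↑l.length + 1) = (i + 1) + ↑l.length := by ring
      rw [hrange, hstep]
      rw [ih (i + 1) _ (fun k hk => by
        have h2 := h (k + 1) (by simpa using Nat.succ_lt_succ hk)
        have e1 : ((k + 1 : Nat) : Int) = (k : Int) + 1 := by push_cast; ring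
        rw [e1] at h2
        have e2 : i + ((k : Int) + 1) = i + 1 + (k : Int) := by ring
        rw [e2] at h2
        simpa using h2)]
      simp [pvLoopA]

-- ===== VERDICT (by name: the statement is the Claim_ definition above) =====
theorem longest_contiguous_matching_spec : Claim_equal_longest_contiguous_matching := by
  intro a b _
  unfold Spec_longest_contiguous_matching longest_contiguous_matching longest_contiguous_matching_alt
  set n : Int := min (PySem.Str.len a) (PySem.Str.len b) with hn
  have hn0 : 0 ≤ n := by
    simp [hn, PySem.Str.len_eq]
  set eqs : List Bool := (PySem.List.pyRange 0 n 1).map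
    (fun i => PySem.Str.pyGet? a i == PySem.Str.pyGet? b i) with heqs
  have hlen : (eqs.length : Int) = n := by
    simp [heqs, PySem.List.length_pyRange_one]
    omega
  have hbridge : (PySem.List.pyRange 0 n 1).foldl (pvStepA a b) (0, 0, 0) =
      pvLoopA eqs 0 (0, 0, 0) := by
    have hb := pvBridgeA a b eqs 0 (0, 0, 0) (fun k hk => by
      simp only [heqs] at hk ⊢
      rw [List.getElem!_eq_getElem?_getD, List.getElem?_eq_getElem hk]
      simp [PySem.List.getElem_pyRange_one])
    rw [show (0 : Int) + (eqs.length : Int) = n from by omega] at hb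
    exact hb
  have hfin : pvFinA eqs 0 (0, 0, 0) = pvPick (pvRuns eqs) 0 0 0 := by
    rw [pvMain eqs 0 0 0 0 le_rfl le_rfl]
    simp [pvMerge]
  simp only [hbridge]
  have : (pvLoopA eqs 0 (0,0,0)).2.2 > (pvLoopA eqs 0 (0,0,0)).1 ∨
         ¬ (pvLoopA eqs 0 (0,0,0)).2.2 > (pvLoopA eqs 0 (0,0,0)).1 := by tauto
  rcases this with hgt | hle
  · have h1 : pvFinA eqs 0 (0,0,0) = ((pvLoopA eqs 0 (0,0,0)).2.2, n - (pvLoopA eqs 0 (0,0,0)).2.2) := by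
      simp [pvFinA, hgt, hlen]
    rw [h1] at hfin
    simp only [if_pos hgt]
    rw [← hfin]
  · have h1 : pvFinA eqs 0 (0,0,0) = ((pvLoopA eqs 0 (0,0,0)).1, (pvLoopA eqs 0 (0,0,0)).2.1) := by
      simp [pvFinA, hle]
    rw [h1] at hfin
    simp only [if_neg hle]
    rw [← hfin]
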